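-- pv_equiv track=rewrite | github.com/hyeonjini/algorithm | programmers/level-2/뉴스 클러스터링.py | duplicate_differ_set
-- ===== SOURCE A (Python) =====
-- def duplicate_differ_set(set1, set2):
--
--     set1 = set1.copy()
--     set2 = set2.copy()
--
--     differ = []
--     temp = []
--
--     for a in set1:
--         if a not in set2:
--             differ.append(a)
--         else:
--             set2.remove(a)
--             temp.append(a)
--
--     return differ + set2 + temp
-- ===== SOURCE B (Python) =====
-- def duplicate_differ_set(set1, set2):
--     # One pass with count dictionaries instead of repeated 'in'/'remove' scans.
--     cnt = {}
--     for b in set2: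
--         cnt[b] = cnt.get(b, 0) + 1
--     differ = []
--     temp = []
--     used = {}
--     for a in set1:
--         if cnt.get(a, 0) > 0:
--             cnt[a] = cnt.get(a, 0) - 1
--             used[a] = used.get(a, 0) + 1
--             temp.append(a)
--         else:
--             differ.append(a)
--     rest = []
--     for b in set2:
--         if used.get(b, 0) > 0:
--             used[b] = used.get(b, 0) - 1
--         else:
--             rest.append(b)
--     return differ + rest + temp
-- ===== Notes on version B (the rewrite author's own statement) =====
-- stated objective: faster
-- what changed: Replaces A's per-element linear membership test and remove() scan over a mutating copy of set2 by count dictionaries: one pass builds counts of set2, one pass over set1 matches against the counts, and one pass over set2 rebuilds the unmatched remainder by skipping first-matched occurrences.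
import Mathlib
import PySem

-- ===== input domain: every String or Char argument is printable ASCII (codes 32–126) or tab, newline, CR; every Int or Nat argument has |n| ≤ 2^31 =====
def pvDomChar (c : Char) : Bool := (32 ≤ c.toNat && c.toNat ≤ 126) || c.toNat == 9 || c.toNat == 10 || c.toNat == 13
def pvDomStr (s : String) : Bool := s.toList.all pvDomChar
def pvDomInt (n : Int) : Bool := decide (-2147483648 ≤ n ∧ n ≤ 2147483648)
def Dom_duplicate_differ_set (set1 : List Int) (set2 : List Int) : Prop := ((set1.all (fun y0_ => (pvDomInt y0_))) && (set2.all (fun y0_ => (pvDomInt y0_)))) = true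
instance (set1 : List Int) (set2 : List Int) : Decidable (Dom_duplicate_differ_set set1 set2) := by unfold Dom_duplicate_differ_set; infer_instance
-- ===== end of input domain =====

-- B replaces A's quadratic membership-test/remove loop by count dictionaries built and
-- consumed in single passes (objective: faster, O(n+m) vs O(n*m)); return values agree.

-- ===== PORT A =====
-- loop body of A's 'for a in set1' (state: differ, set2, temp)
def ddsStepA (st : List Int × List Int × List Int) (a : Int) : List Int × List Int × List Int :=
  if a ∉ st.2.1 then (st.1 ++ [a], st.2.1, st.2.2)
  else (st.1, (PySem.List.remove? st.2.1 a).getD [], st.2.2 ++ [a])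

def duplicate_differ_set (set1 : List Int) (set2 : List Int) : List Int :=
  let st := set1.foldl ddsStepA ([], set2, [])
  st.1 ++ st.2.1 ++ st.2.2

-- ===== PORT B =====
-- loop body of B's 'for a in set1' (state: cnt, used, differ, temp)
def ddsStepB (st : PySem.Dict Int Int × PySem.Dict Int Int × List Int × List Int) (a : Int) :
    PySem.Dict Int Int × PySem.Dict Int Int × List Int × List Int :=
  if 0 < st.1.getD a 0 then
    (st.1.insert a (st.1.getD a 0 - 1), st.2.1.insert a (st.2.1.getD a 0 + 1), st.2.2.1, st.2.2.2 ++ [a])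
  else (st.1, st.2.1, st.2.2.1 ++ [a], st.2.2.2)

-- loop body of B's rebuild pass 'for b in set2' (state: used, rest)
def ddsStepRest (st : PySem.Dict Int Int × List Int) (b : Int) : PySem.Dict Int Int × List Int :=
  if 0 < st.1.getD b 0 then (st.1.insert b (st.1.getD b 0 - 1), st.2) else (st.1, st.2 ++ [b])

def duplicate_differ_set_alt (set1 : List Int) (set2 : List Int) : List Int :=
  let cnt := set2.foldl (fun (d : PySem.Dict Int Int) b => d.insert b (d.getD b 0 + 1)) PySem.Dict.empty
  let st := set1.foldl ddsStepB (cnt, PySem.Dict.empty, [], [])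
  let fin := set2.foldl ddsStepRest (st.2.1, [])
  st.2.2.1 ++ fin.2 ++ st.2.2.2

-- ===== PRECONDITION & SPEC =====
def Spec_duplicate_differ_set (set1 : List Int) (set2 : List Int) (out : List Int) : Prop := out = duplicate_differ_set_alt set1 set2
instance (set1 : List Int) (set2 : List Int) (out : List Int) : Decidable (Spec_duplicate_differ_set set1 set2 out) := by unfold Spec_duplicate_differ_set; infer_instance

-- ===== CLAIM (what is proved, stated in full; the proofs are below) =====
def Claim_equal_duplicate_differ_set : Prop := ∀ (set1 : List Int) (set2 : List Int), Dom_duplicate_differ_set set1 set2 → Spec_duplicate_differ_set set1 set2 (duplicate_differ_set set1 set2)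

-- ===== LEMMAS AND PROOFS =====

-- the list l with, for each value v, its first (m v) occurrences removed
def skipF : List Int → (Int → Int) → List Int
  | [], _ => []
  | x :: xs, m => if 0 < m x then skipF xs (fun v => if v = x then m v - 1 else m v)
                  else x :: skipF xs m

theorem skipF_zero (l : List Int) : skipF l (fun _ => 0) = l := by
  induction l with
  | nil => rfl
  | cons x xs ih => simp [skipF, ih]

theorem remove?_of_mem (a : Int) (xs : List Int) (h : a ∈ xs) :
    PySem.List.remove? xs a = some (xs.erase a) := by
  induction xs with
  | nil => simp at h
  | cons x xs ih =>
    simp only [PySem.List.remove?, List.idxOf?, List.findIdx?_cons] at *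
    by_cases hx : x = a
    · subst hx; simp
    · have hxa : (x == a) = false := by simp [hx]
      have ha : a ∈ xs := by
        rcases List.mem_cons.mp h with h' | h'
        · exact absurd h'.symm hx
        · exact h'
      specialize ih ha
      cases hfi : List.findIdx? (fun b => b == a) xs with
      | none => rw [hfi] at ih; simp at ih
      | some k =>
        rw [hfi] at ih; simp only [Option.map_some] at ih
        simp [hxa, Option.some.injEq] at ih ⊢
        exact ih

-- erasing the first a from skipF l m is skipF with one more a skipped
theorem erase_skipF (a : Int) (l : List Int) (m : Int → Int)
    (hm : ∀ v, 0 ≤ m v) (h : a ∈ skipF l m) :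
    (skipF l m).erase a = skipF l (fun v => if v = a then m v + 1 else m v) := by
  induction l generalizing m with
  | nil => simp [skipF] at h
  | cons x xs ih =>
    by_cases hxa : x = a
    · subst hxa
      by_cases hx : 0 < m x
      · have hmdec : ∀ v, 0 ≤ (fun v => if v = x then m v - 1 else m v) v := by
          intro v; dsimp only; split_ifs with hv
          · subst hv; omega
          · exact hm v
        have e1 : skipF (x :: xs) m = skipF xs (fun v => if v = x then m v - 1 else m v) := by
          simp [skipF, hx]
        have e2 : skipF (x :: xs) (fun v => if v = x then m v + 1 else m v) = skipF xs m := by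
          simp only [skipF, if_true]
          rw [if_pos (show (0:Int) < m x + 1 by omega)]
          congr 1; funext v; split_ifs with hv <;> simp [hv]
        rw [e1, e2]
        rw [e1] at h
        rw [ih _ hmdec h]
        congr 1; funext v; split_ifs with hv <;> [skip; rfl]
        subst hv; omega
      · have hx0 : m x = 0 := le_antisymm (not_lt.mp hx) (hm x)
        have e1 : skipF (x :: xs) m = x :: skipF xs m := by simp [skipF, hx]
        have e2 : skipF (x :: xs) (fun v => if v = x then m v + 1 else m v) = skipF xs m := by
          simp only [skipF, if_true]
          rw [if_pos (show (0:Int) < m x + 1 by omega)]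
          congr 1; funext v; split_ifs with hv <;> simp [hv, hx0]
        rw [e1, e2, List.erase_cons_head]
    · by_cases hx : 0 < m x
      · have hmdec : ∀ v, 0 ≤ (fun v => if v = x then m v - 1 else m v) v := by
          intro v; dsimp only; split_ifs with hv
          · subst hv; omega
          · exact hm v
        have e1 : skipF (x :: xs) m = skipF xs (fun v => if v = x then m v - 1 else m v) := by
          simp [skipF, hx]
        have e2 : skipF (x :: xs) (fun v => if v = a then m v + 1 else m v)
            = skipF xs (fun v => if v = a then (if v = x then m v - 1 else m v) + 1
                                 else (if v = x then m v - 1 else m v)) := by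
          simp only [skipF]
          rw [if_neg hxa, if_pos hx]
          congr 1; funext v
          by_cases hv1 : v = x <;> by_cases hv2 : v = a
          · exact absurd (hv1.symm.trans hv2) hxa
          · simp [hv1, hxa]
          · simp [hv2, Ne.symm hxa]
          · simp [hv1, hv2]
        rw [e1] at h
        rw [e1, e2, ih _ hmdec h]
      · have e1 : skipF (x :: xs) m = x :: skipF xs m := by simp [skipF, hx]
        have e2 : skipF (x :: xs) (fun v => if v = a then m v + 1 else m v)
            = x :: skipF xs (fun v => if v = a then m v + 1 else m v) := by
          simp only [skipF]
          rw [if_neg hxa, if_neg hx]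
        rw [e1] at h
        have h' : a ∈ skipF xs m := by
          rcases List.mem_cons.mp h with h' | h'
          · exact absurd h'.symm hxa
          · exact h'
        rw [e1, e2, List.erase_cons_tail (by simpa using hxa), ih _ hm h']

theorem restLoop_eq_skipF (l : List Int) (u : PySem.Dict Int Int) (r : List Int) :
    (l.foldl ddsStepRest (u, r)).2 = r ++ skipF l (fun v => u.getD v 0) := by
  induction l generalizing u r with
  | nil => simp [skipF]
  | cons x xs ih =>
    simp only [List.foldl_cons, ddsStepRest, skipF]
    by_cases hx : 0 < u.getD x 0
    · rw [if_pos hx, if_pos hx, ih]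
      congr 2
      funext v
      rw [PySem.Dict.getD_insert]
      by_cases hv : v = x <;> simp [hv]
    · rw [if_neg hx, if_neg hx, ih]
      simp

theorem main_loop (set2 : List Int) (s1 : List Int) :
    ∀ (d t s2cur : List Int) (cnt u : PySem.Dict Int Int),
    (∀ v, cnt.getD v 0 = (s2cur.count v : Int)) →
    (∀ v, 0 ≤ u.getD v 0) →
    s2cur = skipF set2 (fun v => u.getD v 0) →
    (s1.foldl ddsStepA (d, s2cur, t)).1 = (s1.foldl ddsStepB (cnt, u, d, t)).2.2.1 ∧
    (s1.foldl ddsStepA (d, s2cur, t)).2.2 = (s1.foldl ddsStepB (cnt, u, d, t)).2.2.2 ∧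
    (s1.foldl ddsStepA (d, s2cur, t)).2.1
      = skipF set2 (fun v => ((s1.foldl ddsStepB (cnt, u, d, t)).2.1).getD v 0) := by
  induction s1 with
  | nil =>
    intro d t s2cur cnt u hcnt hu hs2
    exact ⟨rfl, rfl, hs2⟩
  | cons a s1 ih =>
    intro d t s2cur cnt u hcnt hu hs2
    have hmem : (0 < cnt.getD a 0) ↔ a ∈ s2cur := by
      rw [hcnt a]
      exact_mod_cast List.count_pos_iff
    simp only [List.foldl_cons, ddsStepA, ddsStepB]
    by_cases hin : a ∈ s2cur
    · have hc : 0 < cnt.getD a 0 := hmem.mpr hin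
      rw [if_neg (not_not_intro hin), if_pos hc]
      have herase : (PySem.List.remove? s2cur a).getD [] = s2cur.erase a := by
        rw [remove?_of_mem a s2cur hin]; rfl
      rw [herase]
      apply ih
      · intro v
        rw [PySem.Dict.getD_insert]
        by_cases hv : v = a
        · subst hv
          rw [if_pos rfl, hcnt v, List.count_erase_self]
          have : 0 < s2cur.count v := List.count_pos_iff.mpr hin
          omega
        · rw [if_neg hv, hcnt v, List.count_erase_of_ne hv]
      · intro v
        rw [PySem.Dict.getD_insert]
        split_ifs with hv
        · have := hu a; omega
        · exact hu v
      · rw [hs2] at hin ⊢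
        rw [erase_skipF a set2 _ hu hin]
        congr 1
        funext v
        rw [PySem.Dict.getD_insert]
        by_cases hv : v = a <;> simp [hv]
    · have hc : ¬ 0 < cnt.getD a 0 := fun h => hin (hmem.mp h)
      rw [if_pos hin, if_neg hc]
      exact ih (d ++ [a]) t s2cur cnt u hcnt hu hs2

-- ===== VERDICT (by name: the statement is the Claim_ definition above) =====
theorem duplicate_differ_set_spec : Claim_equal_duplicate_differ_set := by
  intro set1 set2 _
  unfold Spec_duplicate_differ_set duplicate_differ_set duplicate_differ_set_alt
  have hcnt : ∀ v, (set2.foldl (fun (d : PySem.Dict Int Int) b => d.insert b (d.getD b 0 + 1)) PySem.Dict.empty).getD v 0 = (set2.count v : Int) := by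
    intro v
    rw [PySem.Dict.getD_foldl_insert_add_one]
    simp [PySem.Dict.getD_empty]
  have hs2 : set2 = skipF set2 (fun v => (PySem.Dict.empty (κ := Int) (ν := Int)).getD v 0) := by
    have : (fun v => (PySem.Dict.empty (κ := Int) (ν := Int)).getD v 0) = (fun _ : Int => (0 : Int)) := by
      funext v; simp [PySem.Dict.getD_empty]
    rw [this, skipF_zero]
  obtain ⟨h1, h2, h3⟩ := main_loop set2 set1 [] [] set2
    (set2.foldl (fun (d : PySem.Dict Int Int) b => d.insert b (d.getD b 0 + 1)) PySem.Dict.empty)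
    PySem.Dict.empty hcnt (fun v => by simp [PySem.Dict.getD_empty]) hs2
  dsimp only
  rw [restLoop_eq_skipF]
  simp only [List.nil_append]
  rw [h1, h2, h3]
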